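-- pv_equiv track=rewrite | github.com/6puritans9/codetree-TILs | 240805/Carry 피하기 2/escaping-carry-2.py | is_carry
-- ===== SOURCE A (Python) =====
-- def is_carry(num1, num2):
--     sub_num1 = num1 % 10
--     sub_num2 = num2 % 10
--     if num1 < 10 or num2 < 10:
--         return sub_num1 + sub_num2 >= 10
--
--     if is_carry(num1 // 10, num2 // 10):
--         return True
--
--     return sub_num1 + sub_num2 >= 10
-- ===== SOURCE B (Python) =====
-- def _digits(n):
--     # least-significant-first digits, stopping once n < 10 (always yields at least one)
--     yield n % 10
--     while n >= 10:
--         n //= 10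
--         yield n % 10
--
--
-- def is_carry(num1, num2):
--     return any(a + b >= 10 for a, b in zip(_digits(num1), _digits(num2)))
-- ===== Notes on version B (the rewrite author's own statement) =====
-- stated objective: alternative
-- what changed: Replaces the recursion (descend to the most significant pair, then OR results back up) with a data-driven formulation: a generator yields each number's least-significant-first digits, zip aligns the pairs, and any() asks whether some aligned pair sums to 10 or more.
import Mathlib
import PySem

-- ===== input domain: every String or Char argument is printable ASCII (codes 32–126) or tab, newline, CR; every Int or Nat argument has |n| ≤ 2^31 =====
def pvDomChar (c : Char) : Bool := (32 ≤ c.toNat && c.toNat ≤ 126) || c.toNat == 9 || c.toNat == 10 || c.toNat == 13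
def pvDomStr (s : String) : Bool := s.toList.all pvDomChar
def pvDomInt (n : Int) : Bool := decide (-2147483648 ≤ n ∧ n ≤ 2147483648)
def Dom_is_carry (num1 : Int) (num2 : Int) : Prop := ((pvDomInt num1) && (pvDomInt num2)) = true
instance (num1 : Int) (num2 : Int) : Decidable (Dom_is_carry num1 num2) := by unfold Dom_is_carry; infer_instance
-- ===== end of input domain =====

-- B recasts A's recursion as: list the aligned least-significant-first digit pairs (zip of digit streams) and test whether any pair sums to ≥ 10.


-- termination measure fact used by both ports
theorem pv_fdiv10_lt (n : Int) (h : ¬ n < 10) :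
    (PySem.Int.floordiv n 10).toNat < n.toNat := by
  rw [PySem.Int.floordiv_eq_ediv_of_pos (by omega)]
  omega

-- ===== PORT A =====
def is_carry (num1 : Int) (num2 : Int) : Bool :=
  let sub_num1 := PySem.Int.mod num1 10
  let sub_num2 := PySem.Int.mod num2 10
  if num1 < 10 ∨ num2 < 10 then
    decide (sub_num1 + sub_num2 ≥ 10)
  else
    if is_carry (PySem.Int.floordiv num1 10) (PySem.Int.floordiv num2 10) then
      true
    else
      decide (sub_num1 + sub_num2 ≥ 10)
termination_by num1.toNat
decreasing_by exact pv_fdiv10_lt num1 (by omega)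

-- ===== PORT B =====
-- the `_digits` generator of Source B, materialised as the list of values it yields
def pvDigits (n : Int) : List Int :=
  PySem.Int.mod n 10 ::
    (if _h : n < 10 then [] else pvDigits (PySem.Int.floordiv n 10))
termination_by n.toNat
decreasing_by exact pv_fdiv10_lt n _h

def is_carry_alt (num1 : Int) (num2 : Int) : Bool :=
  ((pvDigits num1).zip (pvDigits num2)).any (fun p => decide (p.1 + p.2 ≥ 10))

-- ===== PRECONDITION & SPEC =====
def Spec_is_carry (num1 : Int) (num2 : Int) (out : Bool) : Prop := out = is_carry_alt num1 num2
instance (num1 : Int) (num2 : Int) (out : Bool) : Decidable (Spec_is_carry num1 num2 out) := by unfold Spec_is_carry; infer_instance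

-- ===== CLAIM (what is proved, stated in full; the proofs are below) =====
def Claim_equal_is_carry : Prop := ∀ (num1 : Int) (num2 : Int), Dom_is_carry num1 num2 → Spec_is_carry num1 num2 (is_carry num1 num2)

-- ===== LEMMAS AND PROOFS =====
theorem is_carry_eq_alt (num1 num2 : Int) : is_carry num1 num2 = is_carry_alt num1 num2 := by
  rw [is_carry, is_carry_alt, pvDigits.eq_def num1, pvDigits.eq_def num2]
  by_cases h1 : num1 < 10
  · simp [h1, List.zip]
  · by_cases h2 : num2 < 10
    · simp [h1, h2, List.zip]
    · have ih := is_carry_eq_alt (PySem.Int.floordiv num1 10) (PySem.Int.floordiv num2 10)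
      rw [is_carry_alt] at ih
      simp only [h1, h2, or_self, if_false, dite_false, List.zip_cons_cons, List.any_cons, ih]
      cases hr : ((pvDigits (PySem.Int.floordiv num1 10)).zip
          (pvDigits (PySem.Int.floordiv num2 10))).any (fun p => decide (p.1 + p.2 ≥ 10)) <;> simp
termination_by num1.toNat
decreasing_by exact pv_fdiv10_lt num1 h1

-- ===== VERDICT (by name: the statement is the Claim_ definition above) =====
theorem is_carry_spec : Claim_equal_is_carry := by
  intro num1 num2 _
  unfold Spec_is_carry
  exact is_carry_eq_alt num1 num2
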